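-- pv_equiv track=rewrite | github.com/Franciney2519/oficinaLB | app.py | _format_cpf_cnpj
-- ===== SOURCE A (Python) =====
-- def _format_cpf_cnpj(value: str) -> str:
--     """Aplica máscara de CPF ou CNPJ conforme a quantidade de dígitos."""
--     digits = "".join(ch for ch in str(value or "") if ch.isdigit())
--     if not digits:
--         return ""
--
--     if len(digits) > 11:
--         digits = digits[:14]
--         if len(digits) <= 2:
--             return digits
--         if len(digits) <= 5:
--             return f"{digits[:2]}.{digits[2:]}"
--         if len(digits) <= 8:
--             return f"{digits[:2]}.{digits[2:5]}.{digits[5:]}"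
--         if len(digits) <= 12:
--             return f"{digits[:2]}.{digits[2:5]}.{digits[5:8]}/{digits[8:]}"
--         return f"{digits[:2]}.{digits[2:5]}.{digits[5:8]}/{digits[8:12]}-{digits[12:]}"
--
--     digits = digits[:11]
--     if len(digits) <= 3:
--         return digits
--     if len(digits) <= 6:
--         return f"{digits[:3]}.{digits[3:]}"
--     if len(digits) <= 9:
--         return f"{digits[:3]}.{digits[3:6]}.{digits[6:]}"
--     return f"{digits[:3]}.{digits[3:6]}.{digits[6:9]}-{digits[9:]}"
-- ===== SOURCE B (Python) =====
-- def _format_cpf_cnpj(value: str) -> str: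
--     """Aplica máscara de CPF ou CNPJ conforme a quantidade de dígitos."""
--     digits = "".join(ch for ch in str(value or "") if ch.isdigit())
--     if not digits:
--         return ""
--     if len(digits) > 11:
--         digits = digits[:14]
--         seps = {2: ".", 5: ".", 8: "/", 12: "-"}
--     else:
--         digits = digits[:11]
--         seps = {3: ".", 6: ".", 9: "-"}
--     out = []
--     for i, ch in enumerate(digits):
--         if i in seps:
--             out.append(seps[i])
--         out.append(ch)
--     return "".join(out)
-- ===== Notes on version B (the rewrite author's own statement) =====
-- stated objective: simpler
-- what changed: Replaces A's per-length-bucket slicing branches (four f-string cases per mask) with a single position->separator table per mask and one enumerate loop that emits the separator before the digit that follows it.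
import Mathlib
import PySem

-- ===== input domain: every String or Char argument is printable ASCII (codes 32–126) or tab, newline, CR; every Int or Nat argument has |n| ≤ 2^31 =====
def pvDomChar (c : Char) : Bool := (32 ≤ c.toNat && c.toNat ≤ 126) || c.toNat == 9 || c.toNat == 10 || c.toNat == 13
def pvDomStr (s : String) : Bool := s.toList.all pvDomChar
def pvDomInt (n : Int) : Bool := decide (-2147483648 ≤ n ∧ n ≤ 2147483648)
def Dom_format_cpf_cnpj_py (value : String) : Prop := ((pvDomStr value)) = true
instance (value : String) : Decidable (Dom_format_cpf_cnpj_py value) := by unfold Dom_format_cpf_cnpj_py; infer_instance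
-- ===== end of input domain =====

-- B builds the masked string in one pass with a position→separator table instead of A's branch-per-length slicing; objective: simpler.

-- ===== PORT A =====
-- literal transliteration of A: extract digits, truncate, then one slice-based branch per length bucket
def format_cpf_cnpj_py (value : String) : String :=
  -- str(value or "") : for a str argument this is value itself ("" when value is empty)
  let digits := ((if value = "" then "" else value).toList.filter PySem.Chars.isdigit)
  if digits = [] then ""
  else if digits.length > 11 then
    let d := PySem.List.slice digits none (some 14)
    if d.length ≤ 2 then String.ofList d
    else if d.length ≤ 5 then
      String.ofList (PySem.List.slice d none (some 2) ++ ['.'] ++ PySem.List.slice d (some 2) none)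
    else if d.length ≤ 8 then
      String.ofList (PySem.List.slice d none (some 2) ++ ['.'] ++ PySem.List.slice d (some 2) (some 5) ++ ['.'] ++ PySem.List.slice d (some 5) none)
    else if d.length ≤ 12 then
      String.ofList (PySem.List.slice d none (some 2) ++ ['.'] ++ PySem.List.slice d (some 2) (some 5) ++ ['.'] ++ PySem.List.slice d (some 5) (some 8) ++ ['/'] ++ PySem.List.slice d (some 8) none)
    else
      String.ofList (PySem.List.slice d none (some 2) ++ ['.'] ++ PySem.List.slice d (some 2) (some 5) ++ ['.'] ++ PySem.List.slice d (some 5) (some 8) ++ ['/'] ++ PySem.List.slice d (some 8) (some 12) ++ ['-'] ++ PySem.List.slice d (some 12) none)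
  else
    let d := PySem.List.slice digits none (some 11)
    if d.length ≤ 3 then String.ofList d
    else if d.length ≤ 6 then
      String.ofList (PySem.List.slice d none (some 3) ++ ['.'] ++ PySem.List.slice d (some 3) none)
    else if d.length ≤ 9 then
      String.ofList (PySem.List.slice d none (some 3) ++ ['.'] ++ PySem.List.slice d (some 3) (some 6) ++ ['.'] ++ PySem.List.slice d (some 6) none)
    else
      String.ofList (PySem.List.slice d none (some 3) ++ ['.'] ++ PySem.List.slice d (some 3) (some 6) ++ ['.'] ++ PySem.List.slice d (some 6) (some 9) ++ ['-'] ++ PySem.List.slice d (some 9) none)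

-- ===== PORT B =====
-- literal transliteration of Source B: pick mask table, emit separator-before-digit in one enumerate loop
def format_cpf_cnpj_py_alt (value : String) : String :=
  let digits := ((if value = "" then "" else value).toList.filter PySem.Chars.isdigit)
  if digits = [] then ""
  else
    let p := if digits.length > 11
      then (PySem.List.slice digits none (some 14),
            (PySem.Dict.empty.insert (2:Int) '.' |>.insert 5 '.' |>.insert 8 '/' |>.insert 12 '-'))
      else (PySem.List.slice digits none (some 11),
            (PySem.Dict.empty.insert (3:Int) '.' |>.insert 6 '.' |>.insert 9 '-'))
    let out := (PySem.List.enumerate p.1).foldl (fun out ic =>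
      match PySem.Dict.get? p.2 ic.1 with
      | some sep => out ++ [sep, ic.2]
      | none => out ++ [ic.2]) []
    String.ofList out

-- ===== PRECONDITION & SPEC =====
def Spec_format_cpf_cnpj_py (value : String) (out : String) : Prop := out = format_cpf_cnpj_py_alt value
instance (value : String) (out : String) : Decidable (Spec_format_cpf_cnpj_py value out) := by unfold Spec_format_cpf_cnpj_py; infer_instance

-- ===== CLAIM (what is proved, stated in full; the proofs are below) =====
def Claim_equal_format_cpf_cnpj_py : Prop := ∀ (value : String), Dom_format_cpf_cnpj_py value → Spec_format_cpf_cnpj_py value (format_cpf_cnpj_py value)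

-- ===== LEMMAS AND PROOFS =====

-- ===== VERDICT (by name: the statement is the Claim_ definition above) =====
set_option maxHeartbeats 16000000 in
theorem format_cpf_cnpj_py_spec : Claim_equal_format_cpf_cnpj_py := by
  intro value _
  unfold Spec_format_cpf_cnpj_py format_cpf_cnpj_py format_cpf_cnpj_py_alt
  generalize ((if value = "" then "" else value).toList.filter PySem.Chars.isdigit) = ds
  rcases ds with _|⟨a, _|⟨b, _|⟨c, _|⟨d, _|⟨e, _|⟨f, _|⟨g, _|⟨h, _|⟨i, _|⟨j, _|⟨k, _|⟨l, _|⟨m, _|⟨n, rest⟩⟩⟩⟩⟩⟩⟩⟩⟩⟩⟩⟩⟩⟩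
  · rfl
  · rfl
  · rfl
  · rfl
  · rfl
  · rfl
  · rfl
  · rfl
  · rfl
  · rfl
  · rfl
  · rfl
  · rfl
  · rfl
  · -- 14 or more digits: both sides truncate to the same concrete 14-element prefix
    have h1 : (a::b::c::d::e::f::g::h::i::j::k::l::m::n::rest).length > 11 := by
      simp [List.length]
    have h2 : PySem.List.slice (a::b::c::d::e::f::g::h::i::j::k::l::m::n::rest) none (some 14)
        = [a,b,c,d,e,f,g,h,i,j,k,l,m,n] := by
      simp [PySem.List.slice, PySem.List.clampIdx]
    rw [if_neg (by simp : ¬(a::b::c::d::e::f::g::h::i::j::k::l::m::n::rest = [])),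
        if_pos h1, h2]
    rfl
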